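-- pv_equiv track=rewrite | github.com/Abhinav0905/GarmentAnalysis_VLLM | app/utils/helpers.py | parse_location_hint
-- ===== SOURCE A (Python) =====
-- def parse_location_hint(value: str | None) -> dict[str, str | None]:
--     parts = [part.strip() for part in (value or "").split(",") if part.strip()]
--     if len(parts) >= 3:
--         city, country, continent = parts[0], parts[1], parts[2]
--     elif len(parts) == 2:
--         city, country, continent = parts[0], parts[1], None
--     elif len(parts) == 1:
--         city, country, continent = parts[0], None, None
--     else:
--         city, country, continent = None, None, None
--     return {
--         "continent": continent,
--         "country": country,
--         "city": city,
--     }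
-- ===== SOURCE B (Python) =====
-- def parse_location_hint(value):
--     # Single pass over the characters: tokenize on commas with manual
--     # whitespace trimming, then consume the first tokens sequentially.
--     tokens = []
--     cur = []
--     for ch in (value or "") + ",":
--         if ch == ",":
--             i, j = 0, len(cur)
--             while i < j and cur[i].isspace():
--                 i += 1
--             while j > i and cur[j - 1].isspace():
--                 j -= 1
--             word = "".join(cur[i:j])
--             if word:
--                 tokens.append(word)
--             cur = []
--         else:
--             cur.append(ch)
--     city = country = continent = None
--     if tokens:
--         city, *tokens = tokens
--     if tokens:
--         country, *tokens = tokens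
--     if tokens:
--         continent, *tokens = tokens
--     return {
--         "continent": continent,
--         "country": country,
--         "city": city,
--     }
-- ===== Notes on version B (the rewrite author's own statement) =====
-- stated objective: alternative
-- what changed: A's split/strip/filter comprehension plus a four-branch length cascade is replaced by one character-level scan that tokenizes on commas with manual index trimming and then destructures the tokens sequentially.
import Mathlib
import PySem

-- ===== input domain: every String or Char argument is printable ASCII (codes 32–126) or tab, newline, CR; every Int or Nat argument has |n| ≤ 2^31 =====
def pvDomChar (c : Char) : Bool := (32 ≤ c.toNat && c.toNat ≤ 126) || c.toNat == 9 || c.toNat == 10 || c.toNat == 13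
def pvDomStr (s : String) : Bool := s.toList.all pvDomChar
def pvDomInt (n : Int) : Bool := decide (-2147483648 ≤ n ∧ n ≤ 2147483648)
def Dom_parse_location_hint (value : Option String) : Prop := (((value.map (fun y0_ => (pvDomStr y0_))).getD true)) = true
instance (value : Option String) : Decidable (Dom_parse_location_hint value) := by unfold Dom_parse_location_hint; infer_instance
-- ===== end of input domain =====

-- B replaces A's split/strip/filter pipeline plus length cascade by a single
-- character-level scan with manual trimming and sequential token consumption
-- (objective: alternative; same asymptotic cost).

-- ===== PORT A =====
def parse_location_hint (value : Option String) : List (String × Option String) :=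
  let parts := ((PySem.Chars.splitOn (value.getD "").toList [',']).map
      (fun part => String.ofList (PySem.Chars.strip part))).filter (fun p => p ≠ "")
  let (city, country, continent) :=
    if 3 ≤ parts.length then
      (PySem.List.pyGet? parts 0, PySem.List.pyGet? parts 1, PySem.List.pyGet? parts 2)
    else if parts.length = 2 then
      (PySem.List.pyGet? parts 0, PySem.List.pyGet? parts 1, none)
    else if parts.length = 1 then
      (PySem.List.pyGet? parts 0, none, none)
    else
      (none, none, none)
  [("continent", continent), ("country", country), ("city", city)]

-- ===== PORT B =====
-- the two index-advancing while loops of Source B trim exactly the leading and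
-- trailing isspace characters; ported as dropWhile on each end (exact)
def phlTrim (cs : List Char) : List Char :=
  ((cs.dropWhile PySem.Chars.isspace).reverse.dropWhile PySem.Chars.isspace).reverse

-- the `for ch in …` loop of Source B, as structural recursion over the characters
def phlLoop : List Char → List String → List Char → List String
  | [], toks, _ => toks
  | c :: rest, toks, cur =>
    if c = ',' then
      let w := String.ofList (phlTrim cur)
      phlLoop rest (if w = "" then toks else toks ++ [w]) []
    else
      phlLoop rest toks (cur ++ [c])

def parse_location_hint_alt (value : Option String) : List (String × Option String) :=
  let tokens := phlLoop ((value.getD "").toList ++ [',']) [] []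
  -- the three sequential `if tokens: x, *tokens = tokens` consumptions
  let (city, country, continent) :=
    match tokens with
    | [] => (none, none, none)
    | [c1] => (some c1, none, none)
    | [c1, c2] => (some c1, some c2, none)
    | c1 :: c2 :: c3 :: _ => (some c1, some c2, some c3)
  [("continent", continent), ("country", country), ("city", city)]

-- ===== PRECONDITION & SPEC =====
def Spec_parse_location_hint (value : Option String) (out : List (String × Option String)) : Prop := out = parse_location_hint_alt value
instance (value : Option String) (out : List (String × Option String)) : Decidable (Spec_parse_location_hint value out) := by unfold Spec_parse_location_hint; infer_instance

-- ===== CLAIM =====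
def Claim_equal_parse_location_hint : Prop := ∀ (value : Option String), Dom_parse_location_hint value → Spec_parse_location_hint value (parse_location_hint value)

-- ===== LEMMAS AND PROOFS =====

-- simple structural form of splitOn on the single-character separator ','
def phlSp : List Char → List Char → List (List Char)
  | [], cur => [cur.reverse]
  | c :: rest, cur => if c = ',' then cur.reverse :: phlSp rest [] else phlSp rest (c :: cur)

theorem phlSp_go (l : List Char) : ∀ (fuel : Nat) (cur : List Char) (acc : List (List Char)),
    l.length ≤ fuel →
    PySem.Chars.splitOn.go [','] fuel l cur acc = acc.reverse ++ phlSp l cur := by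
  induction l with
  | nil =>
      intro fuel cur acc _
      cases fuel <;> simp [PySem.Chars.splitOn.go, phlSp]
  | cons c rest ih =>
      intro fuel cur acc h
      cases fuel with
      | zero => simp at h
      | succ f =>
          by_cases hc : c = ','
          · subst hc
            simp only [PySem.Chars.splitOn.go, List.isPrefixOf, phlSp]
            simp [ih f [] (cur.reverse :: acc) (by simpa using Nat.lt_succ_iff.mp (by simpa using h))]
          · simp only [PySem.Chars.splitOn.go, List.isPrefixOf, phlSp]
            simp [hc, ih f (c :: cur) acc (by simpa using Nat.lt_succ_iff.mp (by simpa using h))]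
            exact fun h' => absurd h'.symm hc

theorem splitOn_eq_phlSp (s : List Char) :
    PySem.Chars.splitOn s [','] = phlSp s [] := by
  have := phlSp_go s (s.length + 1) [] [] (by omega)
  simpa [PySem.Chars.splitOn] using this

theorem phlTrim_eq_strip (cs : List Char) : phlTrim cs = PySem.Chars.strip cs := rfl

theorem phlLoop_eq (s : List Char) : ∀ (toks : List String) (cur : List Char),
    phlLoop (s ++ [',']) toks cur
      = toks ++ ((phlSp s cur.reverse).map
          (fun part => String.ofList (PySem.Chars.strip part))).filter (fun p => p ≠ "") := by
  induction s with
  | nil =>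
      intro toks cur
      simp only [List.nil_append, phlLoop, phlSp, List.reverse_reverse, List.map, List.filter]
      rw [← phlTrim_eq_strip]
      by_cases hw : String.ofList (phlTrim cur) = "" <;> simp [hw]
  | cons c rest ih =>
      intro toks cur
      by_cases hc : c = ','
      · subst hc
        simp only [List.cons_append, phlLoop, phlSp, List.reverse_reverse]
        rw [ih, phlTrim_eq_strip]
        by_cases hw : String.ofList (PySem.Chars.strip cur) = "" <;> simp [hw]
      · simp only [List.cons_append, phlLoop, phlSp, if_neg hc]
        rw [ih]
        simp

-- A's length cascade and B's sequential destructuring agree on any token list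
theorem phl_assembly (parts : List String) :
    (let (city, country, continent) :=
      if 3 ≤ parts.length then
        (PySem.List.pyGet? parts 0, PySem.List.pyGet? parts 1, PySem.List.pyGet? parts 2)
      else if parts.length = 2 then
        (PySem.List.pyGet? parts 0, PySem.List.pyGet? parts 1, none)
      else if parts.length = 1 then
        (PySem.List.pyGet? parts 0, none, none)
      else
        (none, none, none)
     [("continent", continent), ("country", country), ("city", city)] : List (String × Option String))
    = (let (city, country, continent) :=
        match parts with
        | [] => (none, none, none)
        | [c1] => (some c1, none, none)
        | [c1, c2] => (some c1, some c2, none)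
        | c1 :: c2 :: c3 :: _ => (some c1, some c2, some c3)
       [("continent", continent), ("country", country), ("city", city)]) := by
  match parts with
  | [] => simp
  | [a] => simp [PySem.List.pyGet?, PySem.List.pyIdx?]
  | [a, b] => simp [PySem.List.pyGet?, PySem.List.pyIdx?]
  | a :: b :: c :: t =>
      simp [PySem.List.pyGet?, PySem.List.pyIdx?,
        show (2:Int) ≤ (t.length:Int) + 1 + 1 by omega,
        show (0:Int) ≤ (t.length:Int) + 1 by omega,
        show (0:Int) ≤ (t.length:Int) + 1 + 1 by omega]

-- ===== VERDICT =====
theorem parse_location_hint_spec : Claim_equal_parse_location_hint := by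
  intro value _
  unfold Spec_parse_location_hint parse_location_hint parse_location_hint_alt
  rw [phlLoop_eq, splitOn_eq_phlSp]
  simpa using phl_assembly _
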